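-- pv_equiv track=rewrite | github.com/map-lo/DrumEngine01 | src/preset-from-tci/tci_decoder.py | count_decoded_samples
-- ===== SOURCE A (Python) =====
-- DEFAULT_BLOCK_SIZE = 0xC9
--
-- def count_decoded_samples(payload, bit_len, sample_count, block_size=DEFAULT_BLOCK_SIZE):
--     if sample_count == 0 or bit_len <= 8:
--         return 0
--
--     u_var9 = payload[0]
--     bit_pos = 8
--     block_count = 0
--     count = 0
--
--     while count < sample_count:
--         if (bit_pos >> 3) + 4 > len(payload):
--             break
--
--         count += 1
--         block_count += 1
--         bit_pos += u_var9
--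
--         if block_count >= block_size:
--             byte_index = bit_pos >> 3
--             if byte_index + 2 > len(payload):
--                 break
--             u_var9 = ((payload[byte_index + 1] << 16) | (payload[byte_index] << 24))
--             u_var9 = ((u_var9 << (bit_pos & 7)) & 0xFFFFFFFF) >> 24
--             bit_pos += 8
--             block_count = 0
--
--         if bit_pos >= bit_len:
--             break
--
--     return count
-- ===== SOURCE B (Python) =====
-- DEFAULT_BLOCK_SIZE = 0xC9
--
--
-- def _first_ge(start, step, target, lo):
--     # least i >= lo with start + i*step >= target, or None if no such i exists
--     if start + lo * step >= target:
--         return lo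
--     if step <= 0:
--         return None
--     return -((start - target) // step)  # ceil((target - start) / step)
--
--
-- def _cap(v, p):
--     # v if it is a defined, nearer stop index than p
--     return v if v is not None and v < p else p
--
--
-- def count_decoded_samples(payload, bit_len, sample_count, block_size=DEFAULT_BLOCK_SIZE):
--     if sample_count <= 0 or bit_len <= 8:
--         return 0
--     u = payload[0]
--     L = len(payload)
--     m = block_size if block_size > 1 else 1  # samples per block before a step reload
--     pos = 8
--     count = 0
--     while True:
--         # p = number of further samples decoded before any stop event, were no
--         # reload to intervene: closed-form minimum of the three stop conditions.
--         p = _cap(_first_ge(pos, u, 8 * (L - 3), 0), sample_count - count)  # header check fails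
--         p = _cap(_first_ge(pos, u, bit_len, 1), p)                         # bit cursor passes bit_len
--         if p < m:
--             return count + p
--         # a whole block of m samples is decoded, then the step is reloaded
--         count += m
--         pos += m * u
--         bi = pos >> 3
--         if bi + 2 > L:
--             return count
--         w = (payload[bi + 1] << 16) | (payload[bi] << 24)
--         u = ((w << (pos & 7)) & 0xFFFFFFFF) >> 24
--         pos += 8
--         if pos >= bit_len:
--             return count
-- ===== Notes on version B (the rewrite author's own statement) =====
-- stated objective: alternative
-- what changed: Replaces A's per-sample while-loop by per-reload-block closed-form arithmetic: for each constant-step block, the number of samples decoded before the header check, the sample budget or bit_len stops the loop is computed with one ceiling division, one such step per block instead of one loop iteration per sample.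
-- outside the precondition, e.g. on count_decoded_samples([-5, 0, 0, 0, 0], 100, 3, 2): A returns 3, B returns 3
import Mathlib
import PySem

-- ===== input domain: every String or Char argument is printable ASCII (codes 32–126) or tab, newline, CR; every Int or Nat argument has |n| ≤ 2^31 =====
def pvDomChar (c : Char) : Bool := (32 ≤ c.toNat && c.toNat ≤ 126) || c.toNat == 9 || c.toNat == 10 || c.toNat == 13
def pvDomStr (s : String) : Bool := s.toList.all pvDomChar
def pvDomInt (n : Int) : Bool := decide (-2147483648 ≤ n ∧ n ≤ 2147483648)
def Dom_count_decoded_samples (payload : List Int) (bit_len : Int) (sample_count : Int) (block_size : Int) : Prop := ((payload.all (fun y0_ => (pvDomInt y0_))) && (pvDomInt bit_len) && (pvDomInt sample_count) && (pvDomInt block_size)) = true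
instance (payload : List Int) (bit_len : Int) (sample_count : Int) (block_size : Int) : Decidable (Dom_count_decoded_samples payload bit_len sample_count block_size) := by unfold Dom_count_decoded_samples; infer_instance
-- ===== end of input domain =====

-- B replaces A's per-sample while-loop by per-reload-block closed-form arithmetic
-- (ceiling divisions give the number of samples decoded before each stop event);
-- objective: alternative. Pre_ excludes empty payloads (A raises IndexError) and
-- payloads whose first element is negative when a step reload is reachable
-- (sample_count ≥ the effective block size): a negative initial bit step drives the
-- bit cursor negative and at a reload A indexes the payload with a negative byte
-- index, raising IndexError or reading by Python's accidental negative-index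
-- wraparound.


-- ===== PORT A =====
-- the reload of u_var9 (shared text of both Pythons, ported once):
-- u = (payload[bi+1] << 16) | (payload[bi] << 24); u = ((u << (pos & 7)) & 0xFFFFFFFF) >> 24
-- `<< k` is `* 2^k` via `<<<`, `|`/`&` are PySem.Int.bor/band, `>> 24` is `>>>` — all Python-exact;
-- none = IndexError in Python (excluded by Pre_).
def pvReload (payload : List Int) (bi pos : Int) : Option Int :=
  match PySem.List.pyGet? payload (bi + 1), PySem.List.pyGet? payload bi with
  | some p1, some p0 =>
      let w := PySem.Int.bor (p1 <<< (16:Nat)) (p0 <<< (24:Nat))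
      some ((PySem.Int.band (w <<< (PySem.Int.band pos 7).toNat) 4294967295) >>> (24:Nat))
  | _, _ => none

-- A's while-loop, one fuel unit per iteration (count grows by 1 each iteration, so
-- fuel sample_count.toNat never runs out).
def pvLoopA (payload : List Int) (bit_len sample_count block_size : Int) :
    Nat → Int → Int → Int → Int → Int
  | 0, count, _, _, _ => count
  | fuel + 1, count, block_count, bit_pos, u_var9 =>
    if count < sample_count then
      if (bit_pos >>> (3:Nat)) + 4 > (payload.length : Int) then count
      else
        let count' := count + 1
        let block_count' := block_count + 1
        let bit_pos' := bit_pos + u_var9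
        if block_count' ≥ block_size then
          let byte_index := bit_pos' >>> (3:Nat)
          if byte_index + 2 > (payload.length : Int) then count'
          else
            match pvReload payload byte_index bit_pos' with
            | none => count'   -- Python raises IndexError here; excluded by Pre_
            | some u' =>
              if bit_pos' + 8 ≥ bit_len then count'
              else pvLoopA payload bit_len sample_count block_size fuel count' 0 (bit_pos' + 8) u'
        else
          if bit_pos' ≥ bit_len then count'
          else pvLoopA payload bit_len sample_count block_size fuel count' block_count' bit_pos' u_var9
    else count

def count_decoded_samples (payload : List Int) (bit_len : Int) (sample_count : Int) (block_size : Int) : Int :=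
  if sample_count = 0 ∨ bit_len ≤ 8 then 0
  else
    match PySem.List.pyGet? payload 0 with
    | none => 0   -- Python raises IndexError (empty payload); excluded by Pre_
    | some u0 => pvLoopA payload bit_len sample_count block_size sample_count.toNat 0 0 8 u0

-- ===== PORT B =====
-- least i ≥ lo with start + i*step ≥ target, none if no such i exists
def pvFirstGe (start step target lo : Int) : Option Int :=
  if start + lo * step ≥ target then some lo
  else if step ≤ 0 then none
  else some (-(PySem.Int.floordiv (start - target) step))

-- B's per-block loop: one fuel unit per reload block (count grows by m ≥ 1 each
-- recursion, so fuel sample_count.toNat never runs out).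
def pvCap (v : Option Int) (p : Int) : Int :=
  match v with
  | some a => if a < p then a else p
  | none => p

-- B's per-block loop: one fuel unit per reload block (count grows by m ≥ 1 each
-- recursion, so fuel sample_count.toNat never runs out).
def pvLoopB (payload : List Int) (bit_len sample_count m : Int) :
    Nat → Int → Int → Int → Int
  | 0, count, _, _ => count
  | fuel + 1, count, pos, u =>
    let L : Int := payload.length
    let p0 := pvCap (pvFirstGe pos u (8 * (L - 3)) 0) (sample_count - count)
    let p := pvCap (pvFirstGe pos u bit_len 1) p0
    if p < m then count + p
    else
      let count' := count + m
      let pos' := pos + m * u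
      let bi := pos' >>> (3:Nat)
      if bi + 2 > L then count'
      else
        match pvReload payload bi pos' with
        | none => count'   -- Python raises IndexError here; excluded by Pre_
        | some u' =>
          if pos' + 8 ≥ bit_len then count'
          else pvLoopB payload bit_len sample_count m fuel count' (pos' + 8) u'

def count_decoded_samples_alt (payload : List Int) (bit_len : Int) (sample_count : Int) (block_size : Int) : Int :=
  if sample_count ≤ 0 ∨ bit_len ≤ 8 then 0
  else
    match PySem.List.pyGet? payload 0 with
    | none => 0   -- Python raises IndexError (empty payload); excluded by Pre_
    | some u0 =>
      pvLoopB payload bit_len sample_count (if 1 < block_size then block_size else 1)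
        sample_count.toNat 0 8 u0

-- ===== PRECONDITION & SPEC =====
-- Pre_ excludes the inputs on which A raises IndexError (empty payload past the early
-- return) and payloads whose first element is negative when a step reload is
-- reachable (sample_count ≥ the effective block size): with a negative initial bit
-- step the bit cursor can go negative, and at a reload A indexes the payload with a
-- negative byte index — raising IndexError or reading through Python's
-- negative-index wraparound.
def Pre_count_decoded_samples (payload : List Int) (bit_len : Int) (sample_count : Int) (block_size : Int) : Prop :=
  sample_count = 0 ∨ bit_len ≤ 8 ∨
    (payload ≠ [] ∧ (0 ≤ payload.headI ∨ sample_count < block_size ∨ sample_count < 1))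
instance (payload : List Int) (bit_len : Int) (sample_count : Int) (block_size : Int) : Decidable (Pre_count_decoded_samples payload bit_len sample_count block_size) := by unfold Pre_count_decoded_samples; infer_instance

def pvWitness_count_decoded_samples : List Int × Int × Int × Int := ([2, 7, 33, 11, 250, 0, 4], 40, 5, 3)

def Spec_count_decoded_samples (payload : List Int) (bit_len : Int) (sample_count : Int) (block_size : Int) (out : Int) : Prop := out = count_decoded_samples_alt payload bit_len sample_count block_size
instance (payload : List Int) (bit_len : Int) (sample_count : Int) (block_size : Int) (out : Int) : Decidable (Spec_count_decoded_samples payload bit_len sample_count block_size out) := by unfold Spec_count_decoded_samples; infer_instance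

-- ===== CLAIM (what is proved, stated in full; the proofs are below) =====
def Claim_equal_count_decoded_samples : Prop := ∀ (payload : List Int) (bit_len : Int) (sample_count : Int) (block_size : Int), Dom_count_decoded_samples payload bit_len sample_count block_size → Pre_count_decoded_samples payload bit_len sample_count block_size → Spec_count_decoded_samples payload bit_len sample_count block_size (count_decoded_samples payload bit_len sample_count block_size)

-- ===== LEMMAS AND PROOFS =====

lemma pvFirstGe_some {start step target lo i : Int}
    (h : pvFirstGe start step target lo = some i) :
    lo ≤ i ∧ target ≤ start + i * step ∧ ∀ k : Int, lo ≤ k → k < i → start + k * step < target := by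
  unfold pvFirstGe at h
  split_ifs at h with h1 h2
  · rw [Option.some_inj] at h
    subst h
    exact ⟨le_refl _, h1, fun k hk1 hk2 => absurd (lt_of_le_of_lt hk1 hk2) (lt_irrefl _)⟩
  · rw [Option.some_inj] at h
    subst h
    rw [not_le] at h1
    rw [not_le] at h2
    set q := PySem.Int.floordiv (start - target) step with hq
    have hdm := PySem.Int.floordiv_mul_add_mod (start - target) step
    have hr0 := PySem.Int.mod_nonneg (start - target) h2
    have hr1 := PySem.Int.mod_lt (start - target) h2
    set r := PySem.Int.mod (start - target) step with hrr
    refine ⟨?_, by nlinarith, ?_⟩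
    · by_contra hc
      rw [not_le] at hc
      have : -q ≤ lo - 1 := by omega
      nlinarith
    · intro k hk1 hk2
      have hk3 : k ≤ -q - 1 := by omega
      nlinarith


lemma pvFirstGe_none {start step target lo : Int}
    (h : pvFirstGe start step target lo = none) :
    ∀ k : Int, lo ≤ k → start + k * step < target := by
  intro k hk
  unfold pvFirstGe at h
  split_ifs at h with h1 h2
  rw [not_le] at h1
  have := mul_le_mul_of_nonpos_right hk h2
  linarith


lemma pvReload_nonneg {payload : List Int} {bi pos u' : Int}
    (h : pvReload payload bi pos = some u') : 0 ≤ u' := by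
  unfold pvReload at h
  rcases hg1 : PySem.List.pyGet? payload (bi + 1) with _ | p1 <;> rw [hg1] at h
  · cases h
  rcases hg2 : PySem.List.pyGet? payload bi with _ | p0 <;> rw [hg2] at h
  · cases h
  simp only [Option.some.injEq] at h
  subst h
  apply Int.le_shiftRight_of_nonneg
  rw [PySem.Int.band_comm]
  exact PySem.Int.band_nonneg_of_nonneg_left _ (by norm_num)

lemma pvLoopA_stop_pre (payload : List Int) (bl sc bs : Int) (f : Nat) (count bc pos u : Int)
    (h1 : count < sc) (h2 : 8 * ((payload.length : Int) - 3) ≤ pos) :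
    pvLoopA payload bl sc bs (f + 1) count bc pos u = count := by
  have hdiv : pos >>> (3:Nat) = pos / 8 := by rw [Int.shiftRight_eq_div_pow]; norm_num
  have : (pos >>> (3:Nat)) + 4 > (payload.length : Int) := by rw [hdiv]; omega
  simp [pvLoopA, h1, this]

lemma pvLoopA_stop_len (payload : List Int) (bl sc bs : Int) (f : Nat) (count bc pos u : Int)
    (h1 : count < sc) (h2 : pos < 8 * ((payload.length : Int) - 3))
    (h3 : bc + 1 < bs) (h4 : bl ≤ pos + u) :
    pvLoopA payload bl sc bs (f + 1) count bc pos u = count + 1 := by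
  have hdiv : pos >>> (3:Nat) = pos / 8 := by rw [Int.shiftRight_eq_div_pow]; norm_num
  have hp : ¬((pos >>> (3:Nat)) + 4 > (payload.length : Int)) := by rw [hdiv]; omega
  have hb : ¬(bc + 1 ≥ bs) := by omega
  simp [pvLoopA, h1, hp, hb, h4]


-- spec of pvFirstGe



-- count exhausted: A's loop returns count whatever the fuel
lemma pvLoopA_done (payload : List Int) (bl sc bs : Int) (f : Nat) (count bc pos u : Int)
    (h : sc ≤ count) : pvLoopA payload bl sc bs f count bc pos u = count := by
  cases f <;> simp [pvLoopA, not_lt.mpr h]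

-- advancing j "normal" iterations (no break, no reload)
lemma pvLoopA_advance (payload : List Int) (bl sc bs : Int) :
    ∀ (j fA : Nat) (count bc pos u : Int),
    (∀ i : Nat, i < j → count + i < sc) →
    (∀ i : Nat, i < j → pos + i * u < 8 * ((payload.length : Int) - 3)) →
    (∀ i : Nat, i < j → bc + i + 1 < bs) →
    (∀ i : Nat, i < j → pos + (i + 1) * u < bl) →
    pvLoopA payload bl sc bs (fA + j) count bc pos u
      = pvLoopA payload bl sc bs fA (count + j) (bc + j) (pos + j * u) u := by
  intro j
  induction j with
  | zero => intro fA count bc pos u _ _ _ _; simp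
  | succ j ih =>
    intro fA count bc pos u hcnt hpre hbc hbl
    have h0c : count < sc := by have := hcnt 0 (by omega); simpa using this
    have h0p : pos < 8 * ((payload.length : Int) - 3) := by
      have := hpre 0 (by omega); simpa using this
    have h0b : bc + 1 < bs := by have := hbc 0 (by omega); simpa using this
    have h0l : pos + u < bl := by
      have := hbl 0 (by omega); push_cast at this; linarith
    have hdiv : pos >>> (3:Nat) = pos / 8 := by rw [Int.shiftRight_eq_div_pow]; norm_num
    have hp : ¬((pos >>> (3:Nat)) + 4 > (payload.length : Int)) := by rw [hdiv]; omega
    have hb : ¬(bc + 1 ≥ bs) := by omega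
    have hl : ¬(pos + u ≥ bl) := by omega
    show pvLoopA payload bl sc bs ((fA + j) + 1) count bc pos u = _
    simp only [pvLoopA, h0c, hp, hb, hl, if_true, if_false]
    rw [ih fA (count + 1) (bc + 1) (pos + u) u
      (fun i hi => by have := hcnt (i+1) (by omega); push_cast at this ⊢; linarith)
      (fun i hi => by have := hpre (i+1) (by omega); push_cast at this ⊢; ring_nf at this ⊢; linarith)
      (fun i hi => by have := hbc (i+1) (by omega); push_cast at this ⊢; linarith)
      (fun i hi => by have := hbl (i+1) (by omega); push_cast at this ⊢; ring_nf at this ⊢; linarith)]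
    congr 1 <;> push_cast <;> ring

-- one closing iteration: header check fails

-- one closing iteration: bit cursor passes bit_len (no reload on this step)

-- one step of B's loop: the computed p is the closed-form stop count
lemma pvLoopB_cases (payload : List Int) (bl sc m : Int) (fB : Nat) (count pos u : Int)
    (hr0 : 0 ≤ sc - count) :
    ∃ p : Int, 0 ≤ p ∧ p ≤ sc - count ∧
      (∀ i : Int, 0 ≤ i → i < p → pos + i * u < 8 * ((payload.length : Int) - 3)) ∧
      (∀ k : Int, 1 ≤ k → k < p → pos + k * u < bl) ∧
      (p = sc - count ∨ 8 * ((payload.length : Int) - 3) ≤ pos + p * u ∨ (1 ≤ p ∧ bl ≤ pos + p * u)) ∧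
      (p < m → pvLoopB payload bl sc m (fB + 1) count pos u = count + p) ∧
      (¬ p < m → pvLoopB payload bl sc m (fB + 1) count pos u =
        (if ((pos + m * u) >>> (3:Nat)) + 2 > (payload.length : Int) then count + m
         else match pvReload payload ((pos + m * u) >>> (3:Nat)) (pos + m * u) with
           | none => count + m
           | some u' => if pos + m * u + 8 ≥ bl then count + m
             else pvLoopB payload bl sc m fB (count + m) (pos + m * u + 8) u')) := by
  simp only [pvLoopB]
  rcases ha : pvFirstGe pos u (8 * ((payload.length : Int) - 3)) 0 with _ | a
  · have hA := pvFirstGe_none ha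
    rcases hb : pvFirstGe pos u bl 1 with _ | b
    · have hB := pvFirstGe_none hb
      simp only [pvCap]
      exact ⟨sc - count, hr0, le_refl _,
        fun i hi _ => hA i hi, fun k hk _ => hB k hk, Or.inl rfl,
        fun h => by rw [if_pos h], fun h => by rw [if_neg h]⟩
    · obtain ⟨hb1, hb2, hb3⟩ := pvFirstGe_some hb
      simp only [pvCap]
      by_cases hlt : b < sc - count
      · exact ⟨b, by omega, by omega,
          fun i hi _ => hA i hi, fun k hk1 hk2 => hb3 k hk1 hk2,
          Or.inr (Or.inr ⟨hb1, hb2⟩),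
          fun h => by rw [if_pos hlt, if_pos h], fun h => by rw [if_pos hlt, if_neg h]⟩
      · exact ⟨sc - count, hr0, le_refl _,
          fun i hi _ => hA i hi, fun k hk1 hk2 => hb3 k hk1 (by omega),
          Or.inl rfl,
          fun h => by rw [if_neg hlt, if_pos h], fun h => by rw [if_neg hlt, if_neg h]⟩
  · obtain ⟨ha1, ha2, ha3⟩ := pvFirstGe_some ha
    simp only [pvCap]
    by_cases halt : a < sc - count
    · rcases hb : pvFirstGe pos u bl 1 with _ | b
      · have hB := pvFirstGe_none hb
        simp only [pvCap]
        exact ⟨a, by omega, by omega,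
          fun i hi1 hi2 => ha3 i hi1 hi2, fun k hk _ => hB k hk,
          Or.inr (Or.inl ha2),
          fun h => by rw [if_pos halt, if_pos h], fun h => by rw [if_pos halt, if_neg h]⟩
      · obtain ⟨hb1, hb2, hb3⟩ := pvFirstGe_some hb
        simp only [pvCap]
        rw [if_pos halt]
        by_cases hblt : b < a
        · exact ⟨b, by omega, by omega,
            fun i hi1 hi2 => ha3 i hi1 (by omega), fun k hk1 hk2 => hb3 k hk1 hk2,
            Or.inr (Or.inr ⟨hb1, hb2⟩),
            fun h => by rw [if_pos hblt, if_pos h], fun h => by rw [if_pos hblt, if_neg h]⟩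
        · exact ⟨a, by omega, by omega,
            fun i hi1 hi2 => ha3 i hi1 hi2, fun k hk1 hk2 => hb3 k hk1 (by omega),
            Or.inr (Or.inl ha2),
            fun h => by rw [if_neg hblt, if_pos h], fun h => by rw [if_neg hblt, if_neg h]⟩
    · rcases hb : pvFirstGe pos u bl 1 with _ | b
      · have hB := pvFirstGe_none hb
        simp only [pvCap]
        exact ⟨sc - count, hr0, le_refl _,
          fun i hi1 hi2 => ha3 i hi1 (by omega), fun k hk _ => hB k hk,
          Or.inl rfl,
          fun h => by rw [if_neg halt, if_pos h], fun h => by rw [if_neg halt, if_neg h]⟩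
      · obtain ⟨hb1, hb2, hb3⟩ := pvFirstGe_some hb
        simp only [pvCap]
        rw [if_neg halt]
        by_cases hblt : b < sc - count
        · exact ⟨b, by omega, by omega,
            fun i hi1 hi2 => ha3 i hi1 (by omega), fun k hk1 hk2 => hb3 k hk1 hk2,
            Or.inr (Or.inr ⟨hb1, hb2⟩),
            fun h => by rw [if_pos hblt, if_pos h], fun h => by rw [if_pos hblt, if_neg h]⟩
        · exact ⟨sc - count, hr0, le_refl _,
            fun i hi1 hi2 => ha3 i hi1 (by omega), fun k hk1 hk2 => hb3 k hk1 (by omega),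
            Or.inl rfl,
            fun h => by rw [if_neg hblt, if_pos h], fun h => by rw [if_neg hblt, if_neg h]⟩

-- the main segment lemma: from a block start (block_count = 0), A's loop and B's
-- per-block loop agree
lemma pvLoop_eq (payload : List Int) (bl sc bs m : Int)
    (hm : m = if 1 < bs then bs else 1) :
    ∀ (fB fA : Nat) (count pos u : Int),
    ((0 ≤ u ∧ 8 ≤ pos) ∨ sc - count < m) → count ≤ sc →
    (sc - count).toNat ≤ fA → (sc - count).toNat ≤ fB →
    pvLoopA payload bl sc bs fA count 0 pos u = pvLoopB payload bl sc m fB count pos u := by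
  have hm1 : 1 ≤ m := by rw [hm]; split <;> omega
  have hmbs : bs ≤ m := by rw [hm]; split <;> omega
  have hbsm : ∀ j : Int, 1 ≤ j → j < m → j < bs := by
    intro j h1 h2
    by_cases hbs : 1 < bs
    · rw [hm, if_pos hbs] at h2; omega
    · rw [hm, if_neg hbs] at h2; omega
  intro fB
  induction fB with
  | zero =>
    intro fA count pos u _huor hcnt hfA hfB
    have hsc : sc ≤ count := by omega
    rw [pvLoopA_done payload bl sc bs fA count 0 pos u hsc]
    rfl
  | succ fB ih =>
    intro fA count pos u huor hcnt hfA hfB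
    obtain ⟨p, hp0, hpr, hpre, hlen, hreason, hBlt, hBge⟩ :=
      pvLoopB_cases payload bl sc m fB count pos u (by omega)
    by_cases hpm : p < m
    · rw [hBlt hpm]
      by_cases hstop3 : 1 ≤ p ∧ bl ≤ pos + p * u
      · -- the bit cursor passes bit_len at the end of iteration p-1
        obtain ⟨hp1, hpl⟩ := hstop3
        rw [show fA = ((fA - (p - 1).toNat - 1) + 1) + (p - 1).toNat by omega]
        rw [pvLoopA_advance payload bl sc bs ((p - 1).toNat) ((fA - (p - 1).toNat - 1) + 1) count 0 pos u
          (fun i hi => by omega)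
          (fun i hi => hpre i (by omega) (by omega))
          (fun i hi => by have := hbsm ((i : Int) + 1) (by omega) (by omega); omega)
          (fun i hi => hlen ((i : Int) + 1) (by omega) (by omega))]
        rw [show (((p - 1).toNat : Int)) = p - 1 by omega]
        rw [pvLoopA_stop_len payload bl sc bs _ _ _ _ _ (by omega)
          (hpre (p - 1) (by omega) (by omega))
          (by have := hbsm p hp1 hpm; omega)
          (by have h : pos + (p - 1) * u + u = pos + p * u := by ring
              rw [h]; exact hpl)]
        ring
      · by_cases hstop1 : p = sc - count
        · -- the sample budget runs out after p iterations
          rw [show fA = (fA - p.toNat) + p.toNat by omega]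
          rw [pvLoopA_advance payload bl sc bs p.toNat (fA - p.toNat) count 0 pos u
            (fun i hi => by omega)
            (fun i hi => hpre i (by omega) (by omega))
            (fun i hi => by have := hbsm ((i : Int) + 1) (by omega) (by omega); omega)
            (fun i hi => by
              by_cases hip : (i : Int) + 1 < p
              · exact hlen ((i : Int) + 1) (by omega) hip
              · have hieq : (i : Int) + 1 = p := by omega
                rw [hieq]; by_contra hcc; rw [not_lt] at hcc
                exact hstop3 ⟨by omega, hcc⟩)]
          rw [show ((p.toNat : Int)) = p by omega]
          rw [pvLoopA_done payload bl sc bs _ _ _ _ _ (by omega)]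
        · -- the header check fails at iteration p
          have hmid : 8 * ((payload.length : Int) - 3) ≤ pos + p * u := by
            rcases hreason with h | h | h
            · exact absurd h hstop1
            · exact h
            · exact absurd h hstop3
          rw [show fA = ((fA - p.toNat - 1) + 1) + p.toNat by omega]
          rw [pvLoopA_advance payload bl sc bs p.toNat ((fA - p.toNat - 1) + 1) count 0 pos u
            (fun i hi => by omega)
            (fun i hi => hpre i (by omega) (by omega))
            (fun i hi => by have := hbsm ((i : Int) + 1) (by omega) (by omega); omega)
            (fun i hi => by
              by_cases hip : (i : Int) + 1 < p
              · exact hlen ((i : Int) + 1) (by omega) hip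
              · have hieq : (i : Int) + 1 = p := by omega
                rw [hieq]; by_contra hcc; rw [not_lt] at hcc
                exact hstop3 ⟨by omega, hcc⟩)]
          rw [show ((p.toNat : Int)) = p by omega]
          rw [pvLoopA_stop_pre payload bl sc bs _ _ _ _ _ (by omega) hmid]
    · -- a full block of m samples, then the reload
      rw [hBge hpm]
      rw [not_lt] at hpm
      rw [show fA = ((fA - m.toNat) + 1) + (m - 1).toNat by omega]
      rw [pvLoopA_advance payload bl sc bs ((m - 1).toNat) ((fA - m.toNat) + 1) count 0 pos u
        (fun i hi => by omega)
        (fun i hi => hpre i (by omega) (by omega))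
        (fun i hi => by have := hbsm ((i : Int) + 1) (by omega) (by omega); omega)
        (fun i hi => hlen ((i : Int) + 1) (by omega) (by omega))]
      rw [show (((m - 1).toNat : Int)) = m - 1 by omega]
      have hdiv : (pos + (m - 1) * u) >>> (3:Nat) = (pos + (m - 1) * u) / 8 := by
        rw [Int.shiftRight_eq_div_pow]; norm_num
      have hc1 : count + (m - 1) < sc := by omega
      have hc2 : ¬((pos + (m - 1) * u) >>> (3:Nat)) + 4 > ((payload.length : Int)) := by
        rw [hdiv]
        have := hpre (m - 1) (by omega) (by omega)
        omega
      have hc3 : (0 + (m - 1)) + 1 ≥ bs := by omega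
      simp only [pvLoopA, hc1, hc2, hc3, if_true, if_false]
      rw [show pos + (m - 1) * u + u = pos + m * u by ring]
      rw [show count + (m - 1) + 1 = count + m by ring]
      obtain ⟨hu, hpos⟩ : 0 ≤ u ∧ 8 ≤ pos := by rcases huor with h | h; exacts [h, by omega]
      by_cases hbi : ((pos + m * u) >>> (3:Nat)) + 2 > ((payload.length : Int))
      · rw [if_pos hbi, if_pos hbi]
      · rw [if_neg hbi, if_neg hbi]
        rcases hre : pvReload payload ((pos + m * u) >>> (3:Nat)) (pos + m * u) with _ | u'
        · rfl
        · have hmu : 0 ≤ m * u := mul_nonneg (by omega) hu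
          by_cases hbl2 : pos + m * u + 8 ≥ bl
          · simp only [hbl2, if_true]
          · simp only [hbl2, if_false]
            exact ih (fA - m.toNat) (count + m) (pos + m * u + 8) u'
              (Or.inl ⟨pvReload_nonneg hre, by omega⟩) (by omega) (by omega) (by omega)

-- ===== VERDICT (by name: the statement is the Claim_ definition above) =====
theorem count_decoded_samples_spec : Claim_equal_count_decoded_samples := by
  intro payload bit_len sample_count block_size _hdom hpre
  unfold Spec_count_decoded_samples count_decoded_samples count_decoded_samples_alt
  by_cases hg : sample_count = 0 ∨ bit_len ≤ 8
  · have hg' : sample_count ≤ 0 ∨ bit_len ≤ 8 := by omega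
    rw [if_pos hg, if_pos hg']
  · have hbl : ¬ bit_len ≤ 8 := fun h => hg (Or.inr h)
    rcases hpre with h | h | ⟨hne, hhead⟩
    · exact absurd (Or.inl h) hg
    · exact absurd (Or.inr h) hg
    rw [if_neg hg]
    cases payload with
    | nil => exact absurd rfl hne
    | cons x xs =>
      have hg0 : PySem.List.pyGet? (x :: xs) (0 : Int) = some x := by simp [pysem]
      simp only [hg0]
      by_cases hsc : sample_count ≤ 0
      · rw [if_pos (Or.inl hsc)]
        rw [show sample_count.toNat = 0 by omega]
        rfl
      · rw [if_neg (by omega : ¬(sample_count ≤ 0 ∨ bit_len ≤ 8))]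
        refine pvLoop_eq (x :: xs) bit_len sample_count block_size
          (if 1 < block_size then block_size else 1) rfl
          sample_count.toNat sample_count.toNat 0 8 x ?_ (by omega) (by omega) (by omega)
        rcases hhead with h | h | h
        · exact Or.inl ⟨by simpa using h, by norm_num⟩
        · exact Or.inr (by split <;> omega)
        · exact absurd h (by omega)
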